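-- pv_equiv track=rewrite | github.com/angry-Ninja/Competitive-Programming | Codechef/Python3/EVENT.py | days_in_between
-- ===== SOURCE A (Python) =====
-- days=[ "saturday", "sunday", "monday", "tuesday", "wednesday", "thursday", "friday"]
--
-- def days_in_between(d1,d2):
--     ind1=days.index(d1)
--     ans=1
--     while d1!=d2:
--         ans+=1
--         ind1+=1
--         if ind1>6:
--             ind1=0
--         d1=days[ind1]
--     return ans
-- ===== SOURCE B (Python) =====
-- days=[ "saturday", "sunday", "monday", "tuesday", "wednesday", "thursday", "friday"]
--
-- def days_in_between(d1, d2):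
--     return (days.index(d2) - days.index(d1)) % 7 + 1
-- ===== Notes on version B (the rewrite author's own statement) =====
-- stated objective: simpler
-- what changed: Replaces the one-day-at-a-time stepping loop with a closed-form modular computation from the two list indices.
import Mathlib
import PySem

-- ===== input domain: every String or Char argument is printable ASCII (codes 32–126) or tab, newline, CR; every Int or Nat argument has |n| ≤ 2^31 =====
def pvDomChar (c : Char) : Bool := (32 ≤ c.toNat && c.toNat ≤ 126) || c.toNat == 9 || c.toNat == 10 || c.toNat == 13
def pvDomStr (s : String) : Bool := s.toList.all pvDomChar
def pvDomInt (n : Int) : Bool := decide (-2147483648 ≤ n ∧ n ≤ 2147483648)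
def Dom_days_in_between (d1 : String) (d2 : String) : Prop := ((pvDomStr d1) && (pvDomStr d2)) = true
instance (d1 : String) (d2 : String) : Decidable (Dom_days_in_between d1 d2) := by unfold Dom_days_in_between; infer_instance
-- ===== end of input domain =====

-- B replaces A's one-day-at-a-time stepping loop with the closed form (index d2 - index d1) % 7 + 1.

-- ===== PORT A =====
def pvDays : List String :=
  ["saturday", "sunday", "monday", "tuesday", "wednesday", "thursday", "friday"]

-- A's while loop, transliterated with fuel; under Pre_ (d2 a valid day) the loop
-- reaches d2 within 7 steps, so fuel 8 is never exhausted on admitted inputs.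
def daysLoopA : Nat → String → String → Int → Int → Int
  | 0, _, _, _, ans => ans
  | fuel + 1, d1, d2, ind1, ans =>
      if d1 ≠ d2 then
        let ans := ans + 1
        let ind1 := ind1 + 1
        let ind1 := if ind1 > 6 then 0 else ind1
        let d1 := (PySem.List.pyGet? pvDays ind1).getD ""
        daysLoopA fuel d1 d2 ind1 ans
      else ans

def days_in_between (d1 : String) (d2 : String) : Int :=
  match PySem.List.index? pvDays d1 with
  | none => 0  -- days.index(d1) raises ValueError in Python; excluded by Pre_
  | some ind1 => daysLoopA 8 d1 d2 (Int.ofNat ind1) 1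

-- ===== PORT B =====
def days_in_between_alt (d1 : String) (d2 : String) : Int :=
  match PySem.List.index? pvDays d2, PySem.List.index? pvDays d1 with
  | some i2, some i1 => PySem.Int.mod ((Int.ofNat i2) - (Int.ofNat i1)) 7 + 1
  | _, _ => 0  -- days.index raises ValueError in Python; excluded by Pre_

-- ===== PRECONDITION & SPEC =====
-- Pre_ admits exactly the inputs on which A returns: if d1 is not a weekday name A raises
-- ValueError, and if d1 is valid but d2 is not, A's while loop never terminates.
def Pre_days_in_between (d1 : String) (d2 : String) : Prop :=
  d1 ∈ pvDays ∧ d2 ∈ pvDays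
instance (d1 : String) (d2 : String) : Decidable (Pre_days_in_between d1 d2) := by
  unfold Pre_days_in_between; infer_instance

def pvWitness_days_in_between : String × String := ("sunday", "monday")

def Spec_days_in_between (d1 : String) (d2 : String) (out : Int) : Prop := out = days_in_between_alt d1 d2
instance (d1 : String) (d2 : String) (out : Int) : Decidable (Spec_days_in_between d1 d2 out) := by unfold Spec_days_in_between; infer_instance

-- ===== CLAIM (what is proved, stated in full; the proofs are below) =====
def Claim_equal_days_in_between : Prop := ∀ (d1 : String) (d2 : String), Dom_days_in_between d1 d2 → Pre_days_in_between d1 d2 → Spec_days_in_between d1 d2 (days_in_between d1 d2)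

-- ===== LEMMAS AND PROOFS =====

-- ===== VERDICT (by name: the statement is the Claim_ definition above) =====
theorem days_in_between_spec : Claim_equal_days_in_between := by
  intro d1 d2 _ hpre
  obtain ⟨h1, h2⟩ := hpre
  unfold Spec_days_in_between
  fin_cases h1 <;> fin_cases h2 <;> decide
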